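-- pv_equiv track=rewrite | github.com/uriberger/reserach_methods_in_software_engineering | code_snippet11.py | long_code_snippet11
-- ===== SOURCE A (Python) =====
-- def long_code_snippet11(str1,str2,my_char,escape_char,max_insert_count):
--     prev_ind = 0
--     prev_char = None
--     insert_count = 0
--     res = ''
--     for cur_ind in range(len(str1)):
--         cur_char = str1[cur_ind]
--         if cur_char == my_char:
--             if prev_char != escape_char:
--                 if insert_count < max_insert_count:
--                     res = res + str1[prev_ind:cur_ind+1]
--                     insert_count = insert_count + 1
--                     for _ in range(insert_count):
--                         res = res + str2
--                     prev_ind = cur_ind+1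
--         prev_char = cur_char
--     res = res + str1[prev_ind:cur_ind+1]
--
--     return res
-- ===== SOURCE B (Python) =====
-- def long_code_snippet11(str1, str2, my_char, escape_char, max_insert_count):
--     # A character of str1 can only match my_char if my_char is a single character.
--     if len(my_char) != 1:
--         return str1
--     head, *rest = str1.split(my_char)
--     out = [head]
--     count = 0
--     prev_seg, at_start = head, True
--     for seg in rest:
--         escaped = (escape_char == prev_seg[-1] if prev_seg
--                    else (escape_char == my_char and not at_start))
--         if not escaped and count < max_insert_count:
--             count += 1
--             out.append(my_char + str2 * count)
--         else:
--             out.append(my_char)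
--         prev_seg, at_start = seg, False
--         out.append(seg)
--     return ''.join(out)
-- ===== Notes on version B (the rewrite author's own statement) =====
-- stated objective: faster
-- what changed: A's per-character index loop with interleaved slice flushes into a growing string (quadratic concatenation) and an inner repetition loop is replaced by str.split on the separator followed by a reassembly of the segment list with str2*k parts and one join, checking the escape condition on segment boundaries.
-- crash fix: On str1 = '' A raises UnboundLocalError (the final slice reads the never-bound loop variable); B returns ''. — e.g. on long_code_snippet11("", "-", ",", "\\", 2): A raises UnboundLocalError, B returns ""
import Mathlib
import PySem

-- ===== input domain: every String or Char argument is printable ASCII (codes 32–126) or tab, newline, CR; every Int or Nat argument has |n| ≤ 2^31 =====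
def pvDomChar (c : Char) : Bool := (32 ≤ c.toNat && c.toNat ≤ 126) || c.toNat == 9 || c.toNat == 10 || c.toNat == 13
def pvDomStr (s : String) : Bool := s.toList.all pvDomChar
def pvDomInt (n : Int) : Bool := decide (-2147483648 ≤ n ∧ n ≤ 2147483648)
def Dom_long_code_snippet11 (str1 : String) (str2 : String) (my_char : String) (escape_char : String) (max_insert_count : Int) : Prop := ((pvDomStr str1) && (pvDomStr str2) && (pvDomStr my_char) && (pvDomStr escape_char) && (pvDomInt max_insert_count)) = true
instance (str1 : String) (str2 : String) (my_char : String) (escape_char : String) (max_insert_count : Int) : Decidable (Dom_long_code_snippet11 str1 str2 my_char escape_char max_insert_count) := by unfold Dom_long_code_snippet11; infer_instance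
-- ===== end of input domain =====

-- B replaces A's per-character index loop (interleaved slice flushes + inner repetition loop) by
-- str.split on the separator and a reassembly of the segment list, checking the escape on segment
-- boundaries; objective: faster (a timing run measured B faster; A rebuilds the result string per match).
-- A raises UnboundLocalError on str1 = '' (leftover loop variable); Pre_ excludes it, B returns '' there.

-- ===== PORT A =====
-- one loop step of A: state = (prev_ind, prev_char, insert_count, cur_ind, res); input = (cur_ind, str1[cur_ind])
def pvAstep (cs mc ec s2 : List Char) (m : Int)
    (st : Int × Option (List Char) × Int × Int × List Char) (jc : Int × Char) :
    Int × Option (List Char) × Int × Int × List Char :=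
  let prev_ind := st.1; let prev_char := st.2.1; let insert_count := st.2.2.1; let res := st.2.2.2.2
  let cur_ind := jc.1
  let cur_char := [jc.2]
  if cur_char = mc then
    if prev_char ≠ some ec then
      if insert_count < m then
        let res := res ++ PySem.List.slice cs (some prev_ind) (some (cur_ind + 1))
        let insert_count := insert_count + 1
        let res := (PySem.List.pyRange 0 insert_count 1).foldl (fun r _ => r ++ s2) res
        (cur_ind + 1, some cur_char, insert_count, cur_ind, res)
      else (prev_ind, some cur_char, insert_count, cur_ind, res)
    else (prev_ind, some cur_char, insert_count, cur_ind, res)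
  else (prev_ind, some cur_char, insert_count, cur_ind, res)

def long_code_snippet11 (str1 : String) (str2 : String) (my_char : String) (escape_char : String) (max_insert_count : Int) : String :=
  let cs := str1.toList
  -- for cur_ind in range(len(str1)): cur_char = str1[cur_ind]; …   (cur_ind starts undefined; 0 is a placeholder the
  -- final line only reads when the loop ran, except on str1 = '' where Python raises — excluded by Pre_)
  let st := (PySem.List.pyRange 0 (PySem.Str.len str1) 1).foldl
    (fun st cur_ind =>
      pvAstep cs my_char.toList escape_char.toList str2.toList max_insert_count st
        (cur_ind, PySem.List.pyGetD cs cur_ind ' '))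
    (0, none, 0, 0, [])
  -- res = res + str1[prev_ind:cur_ind+1]
  String.ofList (st.2.2.2.2 ++ PySem.List.slice cs (some st.1) (some (st.2.2.2.1 + 1)))

-- ===== PORT B =====
-- one loop step of B: state = (out, count, prev_seg, at_start); input = the next segment
def pvBstep (mc ec s2 : List Char) (m : Int)
    (st : List (List Char) × Int × List Char × Bool) (seg : List Char) :
    List (List Char) × Int × List Char × Bool :=
  let out := st.1; let count := st.2.1; let prev_seg := st.2.2.1; let at_start := st.2.2.2
  -- escaped = (escape_char == prev_seg[-1] if prev_seg else (escape_char == my_char and not at_start))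
  let escaped : Bool := match prev_seg.getLast? with
    | some c => ec == [c]
    | none => ec == mc && !at_start
  if !escaped && count < m then
    ((out ++ [mc ++ PySem.List.pyRepeat s2 (count + 1)]) ++ [seg], count + 1, seg, false)
  else
    ((out ++ [mc]) ++ [seg], count, seg, false)

def long_code_snippet11_alt (str1 : String) (str2 : String) (my_char : String) (escape_char : String) (max_insert_count : Int) : String :=
  let mc := my_char.toList
  if mc.length ≠ 1 then str1 else
  match PySem.Chars.splitOn str1.toList mc with
  | [] => str1   -- unreachable: str.split on a non-empty separator never returns an empty list
  | head :: rest =>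
    let st := rest.foldl (pvBstep mc escape_char.toList str2.toList max_insert_count)
      ([head], 0, head, true)
    String.ofList (PySem.Chars.join [] st.1)

-- ===== PRECONDITION & SPEC =====
-- Pre_ excludes only str1 = '', on which A raises UnboundLocalError (the loop variable of the final slice was never bound).
def Pre_long_code_snippet11 (str1 : String) (str2 : String) (my_char : String) (escape_char : String) (max_insert_count : Int) : Prop := str1 ≠ ""
instance (str1 : String) (str2 : String) (my_char : String) (escape_char : String) (max_insert_count : Int) : Decidable (Pre_long_code_snippet11 str1 str2 my_char escape_char max_insert_count) := by unfold Pre_long_code_snippet11; infer_instance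

def pvWitness_long_code_snippet11 : String × String × String × String × Int := ("ab,cd\\,e,f", "-", ",", "\\", 2)

-- A raises UnboundLocalError on str1 = ''; B returns '' there, the natural value.
def Raises_long_code_snippet11 (str1 : String) (str2 : String) (my_char : String) (escape_char : String) (max_insert_count : Int) : Prop := str1 = ""
instance (str1 : String) (str2 : String) (my_char : String) (escape_char : String) (max_insert_count : Int) : Decidable (Raises_long_code_snippet11 str1 str2 my_char escape_char max_insert_count) := by unfold Raises_long_code_snippet11; infer_instance
def pvRaiseWitness_long_code_snippet11 : String × String × String × String × Int := ("", "-", ",", "\\", 2)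
def pvRaiseWitnessOut_long_code_snippet11 : String := ""

def Spec_long_code_snippet11 (str1 : String) (str2 : String) (my_char : String) (escape_char : String) (max_insert_count : Int) (out : String) : Prop := out = long_code_snippet11_alt str1 str2 my_char escape_char max_insert_count
instance (str1 : String) (str2 : String) (my_char : String) (escape_char : String) (max_insert_count : Int) (out : String) : Decidable (Spec_long_code_snippet11 str1 str2 my_char escape_char max_insert_count out) := by unfold Spec_long_code_snippet11; infer_instance

-- ===== CLAIM (what is proved, stated in full; the proofs are below) =====
def Claim_equal_long_code_snippet11 : Prop := ∀ (str1 : String) (str2 : String) (my_char : String) (escape_char : String) (max_insert_count : Int), Dom_long_code_snippet11 str1 str2 my_char escape_char max_insert_count → Pre_long_code_snippet11 str1 str2 my_char escape_char max_insert_count → Spec_long_code_snippet11 str1 str2 my_char escape_char max_insert_count (long_code_snippet11 str1 str2 my_char escape_char max_insert_count)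
def Claim_raises_long_code_snippet11 : Prop := (∀ (str1 : String) (str2 : String) (my_char : String) (escape_char : String) (max_insert_count : Int), Dom_long_code_snippet11 str1 str2 my_char escape_char max_insert_count → Raises_long_code_snippet11 str1 str2 my_char escape_char max_insert_count → ¬ Pre_long_code_snippet11 str1 str2 my_char escape_char max_insert_count) ∧ (Dom_long_code_snippet11 (pvRaiseWitness_long_code_snippet11.1) (pvRaiseWitness_long_code_snippet11.2.1) (pvRaiseWitness_long_code_snippet11.2.2.1) (pvRaiseWitness_long_code_snippet11.2.2.2.1) (pvRaiseWitness_long_code_snippet11.2.2.2.2) ∧ Raises_long_code_snippet11 (pvRaiseWitness_long_code_snippet11.1) (pvRaiseWitness_long_code_snippet11.2.1) (pvRaiseWitness_long_code_snippet11.2.2.1) (pvRaiseWitness_long_code_snippet11.2.2.2.1) (pvRaiseWitness_long_code_snippet11.2.2.2.2) ∧ long_code_snippet11_alt (pvRaiseWitness_long_code_snippet11.1) (pvRaiseWitness_long_code_snippet11.2.1) (pvRaiseWitness_long_code_snippet11.2.2.1) (pvRaiseWitness_long_code_snippet11.2.2.2.1) (pvRaiseWitness_long_code_snippet11.2.2.2.2)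 = pvRaiseWitnessOut_long_code_snippet11)

-- ===== LEMMAS AND PROOFS =====

-- what A emits, as a recursion over the characters (prev = previous char, cnt = insert_count)
def pvEmit (mc ec s2 : List Char) (m : Int) : List Char → Option (List Char) → Int → List Char
  | [], _, _ => []
  | c :: rest, prev, cnt =>
    if [c] = mc ∧ prev ≠ some ec ∧ cnt < m
    then [c] ++ PySem.List.pyRepeat s2 (cnt + 1) ++ pvEmit mc ec s2 m rest (some [c]) (cnt + 1)
    else [c] ++ pvEmit mc ec s2 m rest (some [c]) cnt

lemma pv_slice_snoc (pre cs : List Char) (c : Char) (p : Nat) (hp : p ≤ pre.length) :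
    PySem.List.slice (pre ++ c :: cs) (some (p : Int)) (some ((pre.length : Int) + 1))
      = PySem.List.slice (pre ++ c :: cs) (some (p : Int)) (some (pre.length : Int)) ++ [c] := by
  have h1 : ((pre.length : Int) + 1) = ((pre.length + 1 : Nat) : Int) := by push_cast; ring
  have e1 : pre.length + 1 - p = (pre.length - p) + 1 := by omega
  rw [h1, PySem.List.slice_natCast, PySem.List.slice_natCast,
      List.drop_append_of_le_length hp, e1, List.take_append, List.take_append]
  have hd : (List.drop p pre).length = pre.length - p := by simp
  rw [hd]
  have t1 : pre.length - p + 1 - (pre.length - p) = 1 := by omega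
  have t0 : pre.length - p - (pre.length - p) = 0 := by omega
  rw [t1, t0, List.take_of_length_le (Nat.le_succ_of_le (le_of_eq hd)),
      List.take_of_length_le (le_of_eq hd)]
  simp

lemma pv_slice_all (pre : List Char) (p : Nat) :
    PySem.List.slice pre (some (p : Int)) (some (pre.length : Int))
      = PySem.List.slice pre (some (p : Int)) none := by
  rw [PySem.List.slice_natCast, PySem.List.slice_from_natCast]
  exact List.take_of_length_le (by simp)

lemma pv_repeat_fold_nat0 (s2 : List Char) (k : Nat) (r : List Char) :
    (PySem.List.pyRange 0 (k : Int) 1).foldl (fun acc _ => acc ++ s2) r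
      = r ++ PySem.List.pyRepeat s2 (k : Int) := by
  induction k generalizing r with
  | zero => simp [PySem.List.pyRepeat]
  | succ n ih =>
    rw [show ((n+1 : Nat) : Int) = (n : Int) + 1 by push_cast; ring,
        PySem.List.pyRange_one_succ_right (by positivity), List.foldl_append, ih]
    simp [PySem.List.pyRepeat, List.replicate_succ']

lemma pv_repeat_fold_int (s2 : List Char) (k : Int) (r : List Char) :
    (PySem.List.pyRange 0 k 1).foldl (fun acc _ => acc ++ s2) r
      = r ++ PySem.List.pyRepeat s2 k := by
  by_cases hk : 0 ≤ k
  · rw [show k = ((k.toNat : Nat) : Int) by omega]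
    exact pv_repeat_fold_nat0 s2 k.toNat r
  · have h1 : PySem.List.pyRange 0 k 1 = [] := by
      simp [PySem.List.pyRange]
      omega
    have ht : k.toNat = 0 := by omega
    have h2 : PySem.List.pyRepeat s2 k = [] := by
      simp [PySem.List.pyRepeat, ht]
    simp [h1, h2]

lemma pv_A_main (mc ec s2 : List Char) (m : Int) (cs : List Char) :
    ∀ (pre : List Char) (p : Nat), p ≤ pre.length →
    ∀ (prev : Option (List Char)) (cnt : Int) (last : Int) (res : List Char),
    ∃ (q : Nat), q ≤ pre.length + cs.length ∧
      ((PySem.List.enumerate cs (pre.length : Int)).foldl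
          (pvAstep (pre ++ cs) mc ec s2 m) ((p : Int), prev, cnt, last, res)).1 = (q : Int) ∧
      ((PySem.List.enumerate cs (pre.length : Int)).foldl
          (pvAstep (pre ++ cs) mc ec s2 m) ((p : Int), prev, cnt, last, res)).2.2.2.2
        ++ PySem.List.slice (pre ++ cs) (some (q : Int)) none
        = res ++ PySem.List.slice (pre ++ cs) (some (p : Int)) (some (pre.length : Int))
            ++ pvEmit mc ec s2 m cs prev cnt := by
  induction cs with
  | nil =>
    intro pre p hp prev cnt last res
    refine ⟨p, by simpa using hp, by simp [PySem.List.enumerate_nil], ?_⟩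
    simp [PySem.List.enumerate_nil, pvEmit, pv_slice_all]
  | cons c rest ih =>
    intro pre p hp prev cnt last res
    rw [PySem.List.enumerate_cons, List.foldl_cons]
    have hS : pre ++ c :: rest = (pre ++ [c]) ++ rest := by simp
    have hlen : (((pre ++ [c]).length : Nat) : Int) = (pre.length : Int) + 1 := by push_cast; simp
    by_cases h : [c] = mc ∧ prev ≠ some ec ∧ cnt < m
    · obtain ⟨h1, h2, h3⟩ := h
      have hstep : pvAstep (pre ++ c :: rest) mc ec s2 m ((p : Int), prev, cnt, last, res)
          ((pre.length : Int), c)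
          = ((pre.length : Int) + 1, some [c], cnt + 1, (pre.length : Int),
             res ++ PySem.List.slice (pre ++ c :: rest) (some (p : Int)) (some (pre.length : Int))
               ++ [c] ++ PySem.List.pyRepeat s2 (cnt + 1)) := by
        simp only [pvAstep, if_pos h1, if_pos h2, if_pos h3]
        rw [pv_repeat_fold_int, pv_slice_snoc pre rest c p hp]
        simp [List.append_assoc]
      rw [hstep]
      have hc2 : (((pre.length + 1 : Nat)) : Int) = (pre.length : Int) + 1 := by push_cast; ring
      obtain ⟨q, hq, hfst, heq⟩ := ih (pre ++ [c]) (pre.length + 1) (by simp) (some [c]) (cnt + 1)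
        (pre.length : Int)
        (res ++ PySem.List.slice (pre ++ c :: rest) (some (p : Int)) (some (pre.length : Int))
          ++ [c] ++ PySem.List.pyRepeat s2 (cnt + 1))
      rw [hlen, hc2, ← hS] at hfst heq
      have hempty : PySem.List.slice (pre ++ c :: rest) (some ((pre.length : Int) + 1))
          (some ((pre.length : Int) + 1)) = [] := by
        rw [← hc2, PySem.List.slice_natCast]
        simp
      refine ⟨q, by simp at hq ⊢; omega, hfst, ?_⟩
      rw [heq, hempty]
      rw [show pvEmit mc ec s2 m (c :: rest) prev cnt
            = [c] ++ PySem.List.pyRepeat s2 (cnt + 1) ++ pvEmit mc ec s2 m rest (some [c]) (cnt + 1) by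
          simp only [pvEmit, if_pos (⟨h1, h2, h3⟩ : [c] = mc ∧ prev ≠ some ec ∧ cnt < m)]]
      simp [List.append_assoc]
    · have hstep : pvAstep (pre ++ c :: rest) mc ec s2 m ((p : Int), prev, cnt, last, res)
          ((pre.length : Int), c)
          = ((p : Int), some [c], cnt, (pre.length : Int), res) := by
        simp only [pvAstep]
        split_ifs with g1 g2 g3 <;> first | rfl | exact absurd ⟨g1, g2, g3⟩ h
      rw [hstep]
      obtain ⟨q, hq, hfst, heq⟩ := ih (pre ++ [c]) p (by simp; omega) (some [c]) cnt
        (pre.length : Int) res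
      rw [hlen] at hfst heq
      rw [← hS] at hfst heq
      refine ⟨q, by simp at hq ⊢; omega, hfst, ?_⟩
      rw [heq, pv_slice_snoc pre rest c p hp]
      rw [show pvEmit mc ec s2 m (c :: rest) prev cnt
            = [c] ++ pvEmit mc ec s2 m rest (some [c]) cnt by
          simp only [pvEmit, if_neg h]]
      simp [List.append_assoc]

lemma pv_A_last (cs0 mc ec s2 : List Char) (m : Int) :
    ∀ (rest : List Char) (c : Char) (i : Int) (st : Int × Option (List Char) × Int × Int × List Char),
      ((PySem.List.enumerate (c :: rest) i).foldl (pvAstep cs0 mc ec s2 m) st).2.2.2.1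
        = i + rest.length := by
  intro rest
  induction rest with
  | nil =>
    intro c i st
    rw [PySem.List.enumerate_cons, PySem.List.enumerate_nil]
    simp only [List.foldl_cons, List.foldl_nil, pvAstep]
    split_ifs <;> simp
  | cons d rest' ih =>
    intro c i st
    rw [PySem.List.enumerate_cons, List.foldl_cons]
    rw [ih d (i + 1)]
    push_cast [List.length_cons]
    ring

-- A's whole result (on a non-empty string), as pvEmit
lemma pv_A_eval (mc ec s2 : List Char) (m : Int) (cs : List Char) (hne : cs ≠ []) :
    ((PySem.List.enumerate cs 0).foldl (pvAstep cs mc ec s2 m) (0, none, 0, 0, [])).2.2.2.2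
      ++ PySem.List.slice cs
          (some ((PySem.List.enumerate cs 0).foldl (pvAstep cs mc ec s2 m) (0, none, 0, 0, [])).1)
          (some (((PySem.List.enumerate cs 0).foldl (pvAstep cs mc ec s2 m) (0, none, 0, 0, [])).2.2.2.1 + 1))
    = pvEmit mc ec s2 m cs none 0 := by
  have h00 : PySem.List.slice cs (some (0 : Int)) (some (0 : Int)) = [] := by
    simpa using PySem.List.slice_natCast cs 0 0
  obtain ⟨q, hq, hfst, heq⟩ := pv_A_main mc ec s2 m cs [] 0 (by simp) none 0 0 []
  simp only [List.nil_append, List.length_nil, Nat.cast_zero, h00] at hfst heq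
  obtain ⟨c, rest, rfl⟩ : ∃ c rest, cs = c :: rest := by
    cases cs with
    | nil => exact absurd rfl hne
    | cons c rest => exact ⟨c, rest, rfl⟩
  have hlast := pv_A_last (c :: rest) mc ec s2 m rest c 0 (0, none, 0, 0, [])
  rw [hfst, hlast]
  have hup : (0 : Int) + (rest.length : Int) + 1 = (((c :: rest).length : Nat) : Int) := by
    push_cast [List.length_cons]; ring
  rw [hup, pv_slice_all (c :: rest) q, heq]

-- ''.join = flatten
lemma pv_join_nil_flatten (xs : List (List Char)) :
    PySem.Chars.join [] xs = xs.flatten := by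
  induction xs with
  | nil => simp [PySem.Chars.join_nil]
  | cons x xs ih =>
    cases xs with
    | nil => simp [PySem.Chars.join_singleton]
    | cons y ys =>
      rw [PySem.Chars.join_cons_cons]
      simp [ih]

-- the segments of splitting on the single character m, with an accumulated open segment
def pvSegs (m : Char) : List Char → List Char → List (List Char)
  | [], pre => [pre]
  | c :: rest, pre => if c = m then pre :: pvSegs m rest [] else pvSegs m rest (pre ++ [c])

lemma pv_go_eq (m : Char) (s : List Char) :
    ∀ (fuel : Nat), s.length < fuel → ∀ (cur : List Char) (acc : List (List Char)),
      PySem.Chars.splitOn.go [m] fuel s cur acc = acc.reverse ++ pvSegs m s cur.reverse := by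
  induction s with
  | nil =>
    intro fuel hf cur acc
    match fuel, hf with
    | fuel + 1, _ =>
      simp [PySem.Chars.splitOn.go, pvSegs]
  | cons c rest ih =>
    intro fuel hf cur acc
    match fuel, hf with
    | fuel + 1, hf =>
      have hf' : rest.length < fuel := by simp at hf; omega
      by_cases hc : c = m
      · subst hc
        rw [show PySem.Chars.splitOn.go [c] (fuel + 1) (c :: rest) cur acc
              = PySem.Chars.splitOn.go [c] fuel rest [] (cur.reverse :: acc) by
            simp [PySem.Chars.splitOn.go, List.isPrefixOf]]
        rw [ih fuel hf' [] (cur.reverse :: acc)]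
        simp [pvSegs]
      · rw [show PySem.Chars.splitOn.go [m] (fuel + 1) (c :: rest) cur acc
              = PySem.Chars.splitOn.go [m] fuel rest (c :: cur) acc by
            simp [PySem.Chars.splitOn.go, List.isPrefixOf, show ¬ m = c from fun h => hc h.symm]]
        rw [ih fuel hf' (c :: cur) acc]
        simp [pvSegs, hc]

lemma pv_splitOn_eq (m : Char) (cs : List Char) :
    PySem.Chars.splitOn cs [m] = pvSegs m cs [] := by
  unfold PySem.Chars.splitOn
  rw [pv_go_eq m cs (cs.length + 1) (by omega) [] []]
  simp

-- pvSegs reconstruction: non-empty, segments m-free, and intercalating m gives the input back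
lemma pv_segs_spec (m : Char) (cs : List Char) :
    ∀ (pre : List Char), m ∉ pre →
      ∃ h t, pvSegs m cs pre = h :: t ∧ pre ++ cs = h ++ t.flatMap (fun s => m :: s)
        ∧ m ∉ h ∧ ∀ s ∈ t, m ∉ s := by
  induction cs with
  | nil =>
    intro pre hpre
    exact ⟨pre, [], by simp [pvSegs], by simp, hpre, by simp⟩
  | cons c rest ih =>
    intro pre hpre
    by_cases hc : c = m
    · subst hc
      obtain ⟨h, t, he, hr, hh, ht⟩ := ih [] (by simp)
      refine ⟨pre, h :: t, by simp [pvSegs, he], ?_, hpre, ?_⟩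
      · simp only [List.flatMap_cons]
        rw [← List.append_assoc]
        simp [← hr]
      · intro s hs
        rcases List.mem_cons.mp hs with hs | hs
        · exact hs ▸ hh
        · exact ht s hs
    · obtain ⟨h, t, he, hr, hh, ht⟩ := ih (pre ++ [c]) (by
        intro hmem
        rcases List.mem_append.mp hmem with h1 | h1
        · exact hpre h1
        · simp at h1; exact hc h1.symm)
      refine ⟨h, t, by simp [pvSegs, hc, he], ?_, hh, ht⟩
      rw [← hr]; simp

-- if my_char is not a single character, A emits the string unchanged
lemma pv_emit_id (mc ec s2 : List Char) (m : Int) (hmc : mc.length ≠ 1) :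
    ∀ (cs : List Char) (prev : Option (List Char)) (cnt : Int),
      pvEmit mc ec s2 m cs prev cnt = cs := by
  intro cs
  induction cs with
  | nil => intro prev cnt; simp [pvEmit]
  | cons c rest ih =>
    intro prev cnt
    have h1 : ¬ ([c] = mc ∧ prev ≠ some ec ∧ cnt < m) := by
      rintro ⟨h, -, -⟩
      exact hmc (h ▸ rfl)
    simp only [pvEmit, if_neg h1, ih]
    simp

def pvLastPrev (s : List Char) (prev : Option (List Char)) : Option (List Char) :=
  match s.getLast? with
  | some c => some [c]
  | none => prev

-- emitting an m-free block just copies it and updates prev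
lemma pv_emit_free (m : Char) (ec s2 : List Char) (mi : Int) (s : List Char) :
    ∀ (rest : List Char) (prev : Option (List Char)) (cnt : Int), m ∉ s →
      pvEmit [m] ec s2 mi (s ++ rest) prev cnt
        = s ++ pvEmit [m] ec s2 mi rest (pvLastPrev s prev) cnt := by
  induction s with
  | nil => intro rest prev cnt _; simp [pvLastPrev]
  | cons c s' ih =>
    intro rest prev cnt hs
    have hc : c ≠ m := fun h => hs (h ▸ List.mem_cons_self ..)
    have hs' : m ∉ s' := fun h => hs (List.mem_cons_of_mem _ h)
    have h1 : ¬ ([c] = [m] ∧ prev ≠ some ec ∧ cnt < mi) := by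
      rintro ⟨h, -, -⟩; exact hc (by simpa using h)
    rw [List.cons_append]
    simp only [pvEmit, if_neg h1]
    rw [ih rest (some [c]) cnt hs']
    have hlp : pvLastPrev (c :: s') prev = pvLastPrev s' (some [c]) := by
      cases s' with
      | nil => simp [pvLastPrev]
      | cons d s'' =>
        rcases hg : (d :: s'').getLast? with _ | e
        · simp at hg
        · simp [pvLastPrev, List.getLast?_cons_cons, hg]
    rw [← hlp]
    simp

def pvPrevOf (m : Char) (prev_seg : List Char) (at_start : Bool) : Option (List Char) :=
  match prev_seg.getLast? with
  | some c => some [c]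
  | none => if at_start then none else some [m]

-- the escape test of B agrees with the pvEmit condition
lemma pv_esc_iff (m : Char) (ec : List Char) (prev_seg : List Char) (at_start : Bool) :
    ((match prev_seg.getLast? with
      | some c => (ec == [c] : Bool)
      | none => (ec == [m] && !at_start : Bool)) = false)
      ↔ pvPrevOf m prev_seg at_start ≠ some ec := by
  cases hgl : prev_seg.getLast? with
  | some c =>
    simp only [hgl, pvPrevOf, beq_eq_false_iff_ne, ne_eq, Option.some.injEq]
    exact not_congr eq_comm
  | none =>
    cases at_start with
    | true => simp [pvPrevOf, hgl]
    | false =>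
      simp only [hgl, pvPrevOf, Bool.not_false, Bool.and_true, Bool.false_eq_true, if_false,
        beq_eq_false_iff_ne, ne_eq, Option.some.injEq]
      exact not_congr eq_comm

-- pvEmit at a separator character
lemma pvEmit_cons_m (m : Char) (ec s2 : List Char) (mi : Int) (rest : List Char)
    (prev : Option (List Char)) (cnt : Int) :
    pvEmit [m] ec s2 mi (m :: rest) prev cnt
      = if prev ≠ some ec ∧ cnt < mi
        then m :: (PySem.List.pyRepeat s2 (cnt + 1) ++ pvEmit [m] ec s2 mi rest (some [m]) (cnt + 1))
        else m :: pvEmit [m] ec s2 mi rest (some [m]) cnt := by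
  simp only [pvEmit, true_and]
  by_cases h : prev ≠ some ec ∧ cnt < mi
  · rw [if_pos h, if_pos h]
    simp
  · rw [if_neg h, if_neg h]
    simp

-- B's fold over the remaining segments computes pvEmit of the m-intercalation of those segments
lemma pv_B_fold (m : Char) (ec s2 : List Char) (mi : Int) :
    ∀ (segs : List (List Char)), (∀ s ∈ segs, m ∉ s) →
    ∀ (out : List (List Char)) (cnt : Int) (prev_seg : List Char) (at_start : Bool),
      ((segs.foldl (pvBstep [m] ec s2 mi) (out, cnt, prev_seg, at_start)).1).flatten
        = out.flatten
          ++ pvEmit [m] ec s2 mi (segs.flatMap (fun s => m :: s)) (pvPrevOf m prev_seg at_start) cnt := by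
  intro segs
  induction segs with
  | nil => intro _ out cnt prev_seg at_start; simp [pvEmit]
  | cons s rest ih =>
    intro hfree out cnt prev_seg at_start
    have hsfree : m ∉ s := hfree s (List.mem_cons_self ..)
    have hrfree : ∀ u ∈ rest, m ∉ u := fun u hu => hfree u (List.mem_cons_of_mem _ hu)
    rw [List.foldl_cons]
    have hebiff := pv_esc_iff m ec prev_seg at_start
    have hlp : pvLastPrev s (some [m]) = pvPrevOf m s false := by
      cases hgl : s.getLast? <;> simp [pvLastPrev, pvPrevOf, hgl]
    have hflat : (s :: rest).flatMap (fun u => m :: u)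
        = m :: (s ++ rest.flatMap (fun u => m :: u)) := by
      simp
    by_cases hins : pvPrevOf m prev_seg at_start ≠ some ec ∧ cnt < mi
    · have h1 := hebiff.mpr hins.1
      have hstep : pvBstep [m] ec s2 mi (out, cnt, prev_seg, at_start) s
          = ((out ++ [[m] ++ PySem.List.pyRepeat s2 (cnt + 1)]) ++ [s], cnt + 1, s, false) := by
        simp only [pvBstep, h1, hins.2]
        simp
      rw [hstep, ih hrfree, hflat, pvEmit_cons_m, if_pos hins,
          pv_emit_free m ec s2 mi s _ _ _ hsfree, hlp]
      simp [List.append_assoc]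
    · have halt : (match prev_seg.getLast? with
            | some c => (ec == [c] : Bool)
            | none => (ec == [m] && !at_start : Bool)) = true ∨ ¬ cnt < mi := by
        by_cases he : (match prev_seg.getLast? with
            | some c => (ec == [c] : Bool)
            | none => (ec == [m] && !at_start : Bool)) = false
        · right; intro hlt; exact hins ⟨hebiff.mp he, hlt⟩
        · left; simpa using he
      have hstep : pvBstep [m] ec s2 mi (out, cnt, prev_seg, at_start) s
          = ((out ++ [[m]]) ++ [s], cnt, s, false) := by
        rcases halt with h | h
        · simp only [pvBstep, h]
          simp
        · simp only [pvBstep]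
          rw [if_neg (by simp [h])]
      rw [hstep, ih hrfree, hflat, pvEmit_cons_m, if_neg hins,
          pv_emit_free m ec s2 mi s _ _ _ hsfree, hlp]
      simp [List.append_assoc]

-- B's whole result = pvEmit
lemma pv_B_eval (mc ec s2 : List Char) (mi : Int) (cs : List Char) :
    (if mc.length ≠ 1 then String.ofList cs else
      match PySem.Chars.splitOn cs mc with
      | [] => String.ofList cs
      | head :: rest =>
        String.ofList (PySem.Chars.join []
          ((rest.foldl (pvBstep mc ec s2 mi) ([head], 0, head, true)).1)))
    = String.ofList (pvEmit mc ec s2 mi cs none 0) := by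
  by_cases hmc : mc.length ≠ 1
  · rw [if_pos hmc, pv_emit_id mc ec s2 mi hmc]
  · rw [if_neg hmc]
    push_neg at hmc
    obtain ⟨m, rfl⟩ : ∃ m, mc = [m] := by
      match mc, hmc with
      | [m], _ => exact ⟨m, rfl⟩
    rw [pv_splitOn_eq m cs]
    obtain ⟨h, t, he, hr, hh, ht⟩ := pv_segs_spec m cs [] (by simp)
    simp only [List.nil_append] at hr
    rw [he]
    show String.ofList (PySem.Chars.join [] ((t.foldl (pvBstep [m] ec s2 mi) ([h], 0, h, true)).1))
        = String.ofList (pvEmit [m] ec s2 mi cs none 0)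
    rw [pv_join_nil_flatten, pv_B_fold m ec s2 mi t ht [h] 0 h true]
    rw [hr, pv_emit_free m ec s2 mi h _ _ _ hh]
    have : pvLastPrev h none = pvPrevOf m h true := by
      cases hgl : h.getLast? <;> simp [pvLastPrev, pvPrevOf, hgl]
    rw [this]
    simp

-- ===== VERDICT (by name: the statements are the Claim_ definitions above) =====
theorem long_code_snippet11_spec : Claim_equal_long_code_snippet11 := by
  intro str1 str2 my_char escape_char m _ hpre
  unfold Pre_long_code_snippet11 at hpre
  unfold Spec_long_code_snippet11 long_code_snippet11 long_code_snippet11_alt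
  set mc := my_char.toList
  set ec := escape_char.toList
  set s2 := str2.toList
  set cs := str1.toList with hcsdef
  have hne : cs ≠ [] := by
    intro h
    apply hpre
    have h2 := congrArg String.ofList h
    rw [String.ofList_toList] at h2
    simpa using h2
  have hlen1 : PySem.Str.len str1 = PySem.List.len cs := by
    rw [PySem.Str.len_eq, PySem.List.len_eq]
  have hconvA : ∀ (init : Int × Option (List Char) × Int × Int × List Char),
      (PySem.List.pyRange 0 (PySem.Str.len str1) 1).foldl
        (fun st cur_ind => pvAstep cs mc ec s2 m st (cur_ind, PySem.List.pyGetD cs cur_ind ' '))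
        init
      = (PySem.List.enumerate cs 0).foldl (pvAstep cs mc ec s2 m) init := by
    intro init
    rw [hlen1, PySem.List.enumerate_eq_map_pyRange cs ' ', List.foldl_map]
  have hstr1 : str1 = String.ofList cs := by rw [hcsdef, String.ofList_toList]
  show String.ofList _ = _
  rw [hconvA, congrArg String.ofList (pv_A_eval mc ec s2 m cs hne), hstr1]
  exact (pv_B_eval mc ec s2 m cs).symm

theorem long_code_snippet11_raises : Claim_raises_long_code_snippet11 := by
  unfold Claim_raises_long_code_snippet11
  exact ⟨fun _ _ _ _ _ _ h => by simpa [Pre_long_code_snippet11] using h, by decide⟩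

-- self-check: the crash-fix theorem indeed places the raise witness outside Pre_
theorem pv_raise_witness_outside_pre_ok : ¬ Pre_long_code_snippet11 "" "-" "," "\\" 2 :=
  long_code_snippet11_raises.1 "" "-" "," "\\" 2 (by decide) rfl
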